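-- pv_equiv track=rewrite | github.com/orginos/jaxQFT | scripts/on/hmc_on.py | _cli_bool
-- ===== SOURCE A (Python) =====
-- def _cli_bool(argv, on_flag: str, off_flag: str):
--     val = None
--     for a in argv:
--         if a == on_flag:
--             val = True
--         elif a == off_flag:
--             val = False
--     return val
-- ===== SOURCE B (Python) =====
-- def _cli_bool(argv, on_flag: str, off_flag: str):
--     for a in reversed(argv):
--         if a == on_flag:
--             return True
--         if a == off_flag:
--             return False
--     return None
-- ===== Notes on version B (the rewrite author's own statement) =====
-- stated objective: alternative
-- what changed: B scans argv from the end and returns on the first flag encountered (checking on_flag first), instead of A's forward scan that overwrites a running value; B short-circuits at the last flag.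
import Mathlib
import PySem

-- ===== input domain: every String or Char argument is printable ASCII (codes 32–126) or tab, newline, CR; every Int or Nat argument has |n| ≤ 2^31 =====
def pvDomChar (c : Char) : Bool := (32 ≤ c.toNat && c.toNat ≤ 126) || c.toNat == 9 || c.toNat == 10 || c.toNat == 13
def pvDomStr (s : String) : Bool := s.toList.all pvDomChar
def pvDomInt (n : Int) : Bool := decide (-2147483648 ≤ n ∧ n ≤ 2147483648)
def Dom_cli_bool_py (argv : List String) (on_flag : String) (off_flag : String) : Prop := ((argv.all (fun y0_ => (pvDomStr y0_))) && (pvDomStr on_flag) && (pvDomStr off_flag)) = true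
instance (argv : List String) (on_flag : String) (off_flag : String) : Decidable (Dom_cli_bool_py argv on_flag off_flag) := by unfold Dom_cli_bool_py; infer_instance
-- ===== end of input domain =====

-- B scans argv from the end and returns on the first flag found (on_flag checked first), instead of A's forward overwrite scan; same results, a different decomposition.

-- ===== PORT A =====
-- A: forward fold keeping a running val, overwritten at each flag
def cli_bool_py (argv : List String) (on_flag : String) (off_flag : String) : Option Bool :=
  argv.foldl
    (fun val a =>
      if a == on_flag then some true
      else if a == off_flag then some false
      else val)
    none

-- ===== PORT B =====
-- B helper: scan a list (already reversed) and short-circuit on the first flag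
def cliBoolRevScan (on_flag off_flag : String) : List String → Option Bool
  | [] => none
  | a :: rest =>
      if a == on_flag then some true
      else if a == off_flag then some false
      else cliBoolRevScan on_flag off_flag rest

def cli_bool_py_alt (argv : List String) (on_flag : String) (off_flag : String) : Option Bool :=
  cliBoolRevScan on_flag off_flag argv.reverse

-- ===== PRECONDITION & SPEC =====
def Spec_cli_bool_py (argv : List String) (on_flag : String) (off_flag : String) (out : Option Bool) : Prop := out = cli_bool_py_alt argv on_flag off_flag
instance (argv : List String) (on_flag : String) (off_flag : String) (out : Option Bool) : Decidable (Spec_cli_bool_py argv on_flag off_flag out) := by unfold Spec_cli_bool_py; infer_instance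

-- ===== CLAIM (what is proved, stated in full; the proofs are below) =====
def Claim_equal_cli_bool_py : Prop := ∀ (argv : List String) (on_flag : String) (off_flag : String), Dom_cli_bool_py argv on_flag off_flag → Spec_cli_bool_py argv on_flag off_flag (cli_bool_py argv on_flag off_flag)

-- ===== LEMMAS AND PROOFS =====

-- the fold from any starting value equals the reversed scan, falling back to the start value
theorem cli_bool_fold_eq_revScan (on_flag off_flag : String) (xs : List String) (v : Option Bool) :
    xs.foldl
      (fun val a =>
        if a == on_flag then some true
        else if a == off_flag then some false
        else val)
      v = (cliBoolRevScan on_flag off_flag xs.reverse).or v := by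
  induction xs using List.reverseRecOn generalizing v with
  | nil => simp [cliBoolRevScan]
  | append_singleton ys a ih =>
      rw [List.foldl_append]
      simp only [List.foldl_cons, List.foldl_nil, List.reverse_append, List.reverse_singleton,
        List.singleton_append, cliBoolRevScan]
      by_cases h1 : a == on_flag
      · simp [h1]
      · by_cases h2 : a == off_flag
        · simp [h1, h2]
        · simp only [if_neg h1, if_neg h2]
          exact ih v

-- ===== VERDICT (by name: the statement is the Claim_ definition above) =====
theorem cli_bool_py_spec : Claim_equal_cli_bool_py := by
  intro argv on_flag off_flag _
  unfold Spec_cli_bool_py cli_bool_py cli_bool_py_alt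
  rw [cli_bool_fold_eq_revScan]
  simp
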